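-- pv_equiv track=rewrite | github.com/raelcun/TopCoder | SRM_429_2/LinearPolyominoCovering.py | findCovering
-- ===== SOURCE A (Python) =====
-- def findCovering(region):
-- 	XInARow = 0
-- 	result = ''
-- 	for char in region:
-- 		if char == 'X':
-- 			XInARow += 1
-- 			continue
--
-- 		if XInARow % 2 == 1: return 'impossible'
--
-- 		while XInARow >= 4:
-- 			result += 'AAAA'
-- 			XInARow -= 4
--
-- 		while XInARow >= 2:
-- 			result += 'BB'
-- 			XInARow -= 2
--
-- 		XInARow = 0
-- 		result += '.'
--
-- 	if XInARow % 2 == 1: return 'impossible'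
--
-- 	while XInARow >= 4:
-- 		result += 'AAAA'
-- 		XInARow -= 4
--
-- 	while XInARow >= 2:
-- 		result += 'BB'
-- 		XInARow -= 2
--
-- 	XInARow = 0
--
-- 	return result
-- ===== SOURCE B (Python) =====
-- def findCovering(region):
--     parts = []
--     i = 0
--     n = len(region)
--     while i < n:
--         j = i
--         while j < n and region[j] == region[i]:
--             j += 1
--         k = j - i
--         if region[i] == 'X':
--             if k % 2 == 1:
--                 return 'impossible'
--             parts.append('A' * (4 * (k // 4)) + 'B' * (k % 4))
--         else:
--             parts.append('.' * k)
--         i = j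
--     return ''.join(parts)
-- ===== Notes on version B (the rewrite author's own statement) =====
-- stated objective: simpler
-- what changed: B splits the region into maximal runs of equal characters with a two-index scan and emits each run's tiling in closed form ('A'*(4*(n//4))+'B'*(n%4) for even X-runs, '.'*n otherwise), replacing A's per-character counter with two subtracting while-loops and its duplicated post-loop flush block.
import Mathlib
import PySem

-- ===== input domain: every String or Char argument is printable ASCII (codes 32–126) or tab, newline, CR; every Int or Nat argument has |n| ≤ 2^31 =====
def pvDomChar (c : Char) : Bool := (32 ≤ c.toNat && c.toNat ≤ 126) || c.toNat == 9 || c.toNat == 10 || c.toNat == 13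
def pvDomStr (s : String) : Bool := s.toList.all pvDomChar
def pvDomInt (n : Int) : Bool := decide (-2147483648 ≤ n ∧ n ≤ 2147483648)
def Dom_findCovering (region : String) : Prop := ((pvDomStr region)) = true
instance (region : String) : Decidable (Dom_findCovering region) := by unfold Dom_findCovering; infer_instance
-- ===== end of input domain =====

-- B replaces A's per-character X-counter and its two subtracting while-loops (plus the
-- duplicated post-loop flush) by a run-splitting scan that emits each run's tiling in
-- closed form; objective: simpler.

-- ===== PORT A =====
-- while XInARow >= 4: result += 'AAAA'; XInARow -= 4
def pvWhileA : Nat → List Char → Nat × List Char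
  | x, res => if 4 ≤ x then pvWhileA (x - 4) (res ++ ['A','A','A','A']) else (x, res)

-- while XInARow >= 2: result += 'BB'; XInARow -= 2
def pvWhileB : Nat → List Char → Nat × List Char
  | x, res => if 2 ≤ x then pvWhileB (x - 2) (res ++ ['B','B']) else (x, res)

-- the for-loop over region, state = (XInARow, result); the [] case is the post-loop tail
def pvGoA : List Char → Nat → List Char → List Char
  | [], x, res =>
    if x % 2 = 1 then ['i','m','p','o','s','s','i','b','l','e']
    else
      let p1 := pvWhileA x res
      let p2 := pvWhileB p1.1 p1.2
      p2.2
  | c :: cs, x, res =>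
    if c = 'X' then pvGoA cs (x + 1) res
    else if x % 2 = 1 then ['i','m','p','o','s','s','i','b','l','e']
    else
      let p1 := pvWhileA x res
      let p2 := pvWhileB p1.1 p1.2
      pvGoA cs 0 (p2.2 ++ ['.'])

def findCovering (region : String) : String := String.mk (pvGoA region.toList 0 [])

-- ===== PORT B =====
-- run scan: peel the maximal leading run, emit its piece in closed form; none = early
-- 'impossible' return
def pvRunsB : List Char → Option (List Char)
  | [] => some []
  | c :: cs =>
    let k := 1 + (cs.takeWhile (· == c)).length
    let rest := cs.dropWhile (· == c)
    if c = 'X' then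
      if k % 2 = 1 then none
      else (pvRunsB rest).map (fun p => (List.replicate (4 * (k / 4)) 'A' ++ List.replicate (k % 4) 'B') ++ p)
    else (pvRunsB rest).map (fun p => List.replicate k '.' ++ p)
  termination_by l => l.length
  decreasing_by all_goals simp; exact List.length_dropWhile_le _ _

def findCovering_alt (region : String) : String :=
  match pvRunsB region.toList with
  | none => "impossible"
  | some p => String.mk p

-- ===== PRECONDITION & SPEC =====
def Spec_findCovering (region : String) (out : String) : Prop := out = findCovering_alt region
instance (region : String) (out : String) : Decidable (Spec_findCovering region out) := by unfold Spec_findCovering; infer_instance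

-- ===== CLAIM (what is proved, stated in full; the proofs are below) =====
def Claim_equal_findCovering : Prop := ∀ (region : String), Dom_findCovering region → Spec_findCovering region (findCovering region)

-- ===== LEMMAS AND PROOFS =====

theorem replFourA : List.replicate 4 'A' = ['A','A','A','A'] := rfl

theorem replTwoB : List.replicate 2 'B' = ['B','B'] := rfl

theorem pvWhileA_eq (x : Nat) : ∀ res, pvWhileA x res = (x % 4, res ++ List.replicate (4 * (x / 4)) 'A') := by
  induction x using Nat.strong_induction_on with
  | _ x ih =>
    intro res
    rw [pvWhileA]
    split
    · rename_i h
      rw [ih (x - 4) (by omega)]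
      have h1 : (x - 4) % 4 = x % 4 := by omega
      have h2 : 4 * (x / 4) = 4 + 4 * ((x - 4) / 4) := by omega
      rw [h1, h2, List.replicate_add, replFourA, List.append_assoc]
    · rename_i h
      have h1 : x % 4 = x := by omega
      have h2 : x / 4 = 0 := by omega
      simp [h1, h2]

theorem pvWhileB_eq (x : Nat) : ∀ res, pvWhileB x res = (x % 2, res ++ List.replicate (2 * (x / 2)) 'B') := by
  induction x using Nat.strong_induction_on with
  | _ x ih =>
    intro res
    rw [pvWhileB]
    split
    · rename_i h
      rw [ih (x - 2) (by omega)]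
      have h1 : (x - 2) % 2 = x % 2 := by omega
      have h2 : 2 * (x / 2) = 2 + 2 * ((x - 2) / 2) := by omega
      rw [h1, h2, List.replicate_add, replTwoB, List.append_assoc]
    · rename_i h
      have h1 : x % 2 = x := by omega
      have h2 : x / 2 = 0 := by omega
      simp [h1, h2]

theorem pvGoA_consume (k : Nat) : ∀ l x res, pvGoA (List.replicate k 'X' ++ l) x res = pvGoA l (x + k) res := by
  induction k with
  | zero => intro l x res; simp
  | succ k ih =>
    intro l x res
    rw [List.replicate_succ, List.cons_append, pvGoA, if_pos rfl, ih]
    have : x + 1 + k = x + (k + 1) := by omega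
    rw [this]

theorem pvGoA_dots (k : Nat) (c : Char) (hc : c ≠ 'X') :
    ∀ l res, pvGoA (List.replicate k c ++ l) 0 res = pvGoA l 0 (res ++ List.replicate k '.') := by
  induction k with
  | zero => intro l res; simp
  | succ k ih =>
    intro l res
    rw [List.replicate_succ, List.cons_append, pvGoA]
    simp only [if_neg hc]
    norm_num
    rw [pvWhileA_eq, pvWhileB_eq]
    simp only [Nat.zero_div, Nat.mul_zero, List.replicate_zero, List.append_nil, Nat.zero_mod]
    rw [ih]
    rw [List.replicate_succ, List.append_assoc]
    rfl

theorem pvGoA_flush (l : List Char) (hl : l.head? ≠ some 'X') (k : Nat) (res : List Char) :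
    pvGoA l k res = if k % 2 = 1 then ['i','m','p','o','s','s','i','b','l','e']
      else pvGoA l 0 (res ++ (List.replicate (4 * (k / 4)) 'A' ++ List.replicate (k % 4) 'B')) := by
  cases l with
  | nil =>
    rw [pvGoA, pvGoA]
    split
    · rfl
    · rename_i h
      norm_num
      rw [pvWhileA_eq, pvWhileB_eq, pvWhileA_eq, pvWhileB_eq]
      simp only [Nat.zero_div, Nat.mul_zero, List.replicate_zero, List.append_nil, Nat.zero_mod]
      have h2 : 2 * (k % 4 / 2) = k % 4 := by omega
      rw [h2, List.append_assoc]
  | cons d t =>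
    have hd : d ≠ 'X' := by
      intro h; apply hl; simp [h]
    rw [pvGoA, pvGoA]
    simp only [if_neg hd]
    split
    · rfl
    · rename_i h
      norm_num
      rw [pvWhileA_eq, pvWhileB_eq, pvWhileA_eq, pvWhileB_eq]
      simp only [Nat.zero_div, Nat.mul_zero, List.replicate_zero, List.append_nil, Nat.zero_mod]
      have h2 : 2 * (k % 4 / 2) = k % 4 := by omega
      rw [h2]
      simp [List.append_assoc]

theorem pvBase (res : List Char) : pvGoA [] 0 res = res := by
  rw [pvGoA]
  norm_num
  rw [pvWhileA_eq, pvWhileB_eq]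
  simp

theorem headDropWhileNe (p : Char → Bool) : ∀ cs : List Char, ∀ c, p c = true →
    (cs.dropWhile p).head? ≠ some c := by
  intro cs c hp
  intro h
  have := List.head?_dropWhile_not p cs
  rw [h] at this
  simp at this
  rw [hp] at this
  exact absurd this (by simp)

theorem takeWhileRepl (c : Char) (cs : List Char) :
    cs.takeWhile (· == c) = List.replicate (cs.takeWhile (· == c)).length c := by
  apply List.eq_replicate_length.mpr
  intro b hb
  have := List.mem_takeWhile_imp hb
  simpa using this

theorem pvMain (n : Nat) : ∀ l : List Char, l.length ≤ n → ∀ res,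
    pvGoA l 0 res = (match pvRunsB l with
      | none => ['i','m','p','o','s','s','i','b','l','e']
      | some p => res ++ p) := by
  induction n with
  | zero =>
    intro l hlen res
    have : l = [] := List.eq_nil_of_length_eq_zero (by omega)
    subst this
    rw [pvBase, pvRunsB]
    simp
  | succ n ih =>
    intro l hlen res
    cases l with
    | nil =>
      rw [pvBase, pvRunsB]
      simp
    | cons c cs =>
      have hsplit : c :: cs = List.replicate (1 + (cs.takeWhile (· == c)).length) c ++ cs.dropWhile (· == c) := by
        conv_lhs => rw [← List.takeWhile_append_dropWhile (p := (· == c)) (l := cs)]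
        rw [Nat.add_comm, List.replicate_succ]
        rw [← takeWhileRepl, List.cons_append]
      have hrest : (cs.dropWhile (· == c)).length ≤ n := by
        have := List.length_dropWhile_le (· == c) cs
        simp at hlen
        omega
      have hhead : (cs.dropWhile (· == c)).head? ≠ some c :=
        headDropWhileNe _ cs c (by simp)
      rw [pvRunsB]
      by_cases hc : c = 'X'
      · subst hc
        rw [hsplit, pvGoA_consume, Nat.zero_add]
        rw [pvGoA_flush _ hhead]
        split
        · rfl
        · rw [ih _ hrest]
          cases hr : pvRunsB (cs.dropWhile (· == 'X')) with
          | none => simp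
          | some p => simp [List.append_assoc]
      · simp only [if_neg hc]
        rw [hsplit, pvGoA_dots _ c hc]
        rw [ih _ hrest]
        cases hr : pvRunsB (cs.dropWhile (· == c)) with
        | none => simp
        | some p => simp [List.append_assoc]

-- ===== VERDICT (by name: the statement is the Claim_ definition above) =====
theorem findCovering_spec : Claim_equal_findCovering := by
  intro region _
  unfold Spec_findCovering findCovering findCovering_alt
  rw [pvMain region.toList.length region.toList le_rfl []]
  cases pvRunsB region.toList <;> rfl
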